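-- pv_equiv track=rewrite | github.com/WardyX/classroom-speech-acts-analysis | getDataset.py | processToken
-- ===== SOURCE A (Python) =====
-- def processToken(tokenList):
--     for i in range(len(tokenList)):
--         if i >=len(tokenList):
--             break
--         if tokenList[i]=='[':
--             for j in range(i+1,len(tokenList)):
--                 if tokenList[j]==']':
--                     tokenList[i:j+1]=["".join(tokenList[i:j+1])]
--                     break
--     return tokenList
-- ===== SOURCE B (Python) =====
-- def processToken(tokenList):
--     # Single left-to-right pass: each '[' is joined with the run up to the
--     # next ']' (if any); the segments are disjoint.
--     # Mutates tokenList in place (like the original) and returns it.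
--     out = []
--     i = 0
--     n = len(tokenList)
--     while i < n:
--         t = tokenList[i]
--         if t == '[':
--             try:
--                 j = tokenList.index(']', i + 1)
--             except ValueError:
--                 out.extend(tokenList[i:])
--                 break
--             out.append("".join(tokenList[i:j + 1]))
--             i = j + 1
--         else:
--             out.append(t)
--             i += 1
--     tokenList[:] = out
--     return tokenList
-- ===== Notes on version B (the rewrite author's own statement) =====
-- stated objective: alternative
-- what changed: Replaced the restart-per-bracket mutate-in-place loop with slice splicing by a single left-to-right pass that matches each '[' to the next ']' and emits the disjoint joined segments into a fresh output list.
import Mathlib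
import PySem

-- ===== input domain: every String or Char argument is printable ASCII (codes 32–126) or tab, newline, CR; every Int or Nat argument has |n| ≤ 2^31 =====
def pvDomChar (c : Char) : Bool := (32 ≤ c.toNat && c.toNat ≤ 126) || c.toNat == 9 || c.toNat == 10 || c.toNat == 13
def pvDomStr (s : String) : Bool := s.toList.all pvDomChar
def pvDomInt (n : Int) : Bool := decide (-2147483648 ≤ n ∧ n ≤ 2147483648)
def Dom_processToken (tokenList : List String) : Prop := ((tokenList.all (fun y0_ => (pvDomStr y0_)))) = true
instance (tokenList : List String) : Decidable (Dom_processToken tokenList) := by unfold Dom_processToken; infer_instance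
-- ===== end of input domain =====

-- B replaces A's restart-per-bracket splice loop by one left-to-right pass emitting joined
-- segments. Both Pythons mutate the argument the same way; the theorems are about the return value.

-- ===== PORT A =====
-- inner 'for j in range(i+1, len(l))' loop: on the first j with l[j] == ']' it performs the
-- slice assignment l[i:j+1] = ["".join(l[i:j+1])] (ported by hand as take/join/drop, exact
-- since 0 ≤ i < j+1 ≤ len) and breaks; otherwise falls through leaving l unchanged.
def pvInnerA (l : List String) (i j : Nat) : List String :=
  if _h : j < l.length then
    if l.getD j "" = "]" then
      l.take i ++ [PySem.Str.join "" ((l.take (j + 1)).drop i)] ++ l.drop (j + 1)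
    else pvInnerA l i (j + 1)
  else l
termination_by l.length - j

-- outer 'for i in range(n)' over the mutating list, with the 'if i >= len(tokenList): break'
def pvLoopA (n i : Nat) (l : List String) : List String :=
  if _h : i < n then
    if l.length ≤ i then l
    else if l.getD i "" = "[" then pvLoopA n (i + 1) (pvInnerA l i (i + 1))
    else pvLoopA n (i + 1) l
  else l
termination_by n - i

def processToken (tokenList : List String) : List String :=
  pvLoopA tokenList.length 0 tokenList

-- ===== PORT B =====
-- tokenList.index(']', i+1): first j ≥ start with l[j] == ']' (hand port, exact; none = ValueError)
def pvFindClose (l : List String) (j : Nat) : Option Nat :=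
  if _h : j < l.length then
    if l.getD j "" = "]" then some j else pvFindClose l (j + 1)
  else none
termination_by l.length - j

theorem pvFindClose_ge (l : List String) (j k : Nat) (h : pvFindClose l j = some k) : j ≤ k := by
  fun_induction pvFindClose l j with
  | case1 => simp_all
  | case2 j _ _ ih => have := ih h; omega
  | case3 => simp_all

-- the while-loop of Source B (out is emitted as the recursion's result)
def pvAltGo (l : List String) (i : Nat) : List String :=
  if hi : i < l.length then
    if l.getD i "" = "[" then
      match hf : pvFindClose l (i + 1) with
      | none => l.drop i
      | some j => PySem.Str.join "" ((l.take (j + 1)).drop i) :: pvAltGo l (j + 1)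
    else l.getD i "" :: pvAltGo l (i + 1)
  else []
termination_by l.length - i
decreasing_by
  · have := pvFindClose_ge l (i + 1) j hf; omega
  · omega

def processToken_alt (tokenList : List String) : List String :=
  pvAltGo tokenList 0

-- ===== PRECONDITION & SPEC =====
def Spec_processToken (tokenList : List String) (out : List String) : Prop := out = processToken_alt tokenList
instance (tokenList : List String) (out : List String) : Decidable (Spec_processToken tokenList out) := by unfold Spec_processToken; infer_instance

-- ===== CLAIM (what is proved, stated in full; the proofs are below) =====
def Claim_equal_processToken : Prop := ∀ (tokenList : List String), Dom_processToken tokenList → Spec_processToken tokenList (processToken tokenList)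

-- ===== LEMMAS AND PROOFS =====

theorem pvFindClose_some (l : List String) (j k : Nat) (h : pvFindClose l j = some k) :
    j ≤ k ∧ k < l.length ∧ l.getD k "" = "]" := by
  fun_induction pvFindClose l j with
  | case1 j hlen heq => cases h; exact ⟨le_rfl, hlen, heq⟩
  | case2 j hlen heq ih =>
    have := ih h
    exact ⟨by omega, this.2⟩
  | case3 => simp_all

-- pure-list model of B: process a suffix
def pvSplitClose : List String → Option (List String × List String)
  | [] => none
  | u :: us =>
      if u = "]" then some ([], us)
      else (pvSplitClose us).map (fun p => (u :: p.1, p.2))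

theorem pvSplitClose_length : ∀ (xs seg rest : List String),
    pvSplitClose xs = some (seg, rest) → rest.length < xs.length := by
  intro xs
  induction xs with
  | nil => intro seg rest h; simp [pvSplitClose] at h
  | cons u us ih =>
    intro seg rest h
    by_cases hu : u = "]"
    · simp [pvSplitClose, hu] at h; simp [← h.2]
    · simp only [pvSplitClose, if_neg hu, Option.map_eq_some_iff] at h
      obtain ⟨⟨s, r⟩, hs, he⟩ := h
      have := ih s r hs
      cases he
      simpa using Nat.lt_succ_of_lt this

def pvG : List String → List String
  | [] => []
  | t :: ts =>
      if t = "[" then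
        match _hs : pvSplitClose ts with
        | none => t :: ts
        | some (seg, rest) => PySem.Str.join "" (t :: (seg ++ ["]"])) :: pvG rest
      else t :: pvG ts
termination_by xs => xs.length
decreasing_by
  · simpa using Nat.lt_succ_of_lt (pvSplitClose_length ts seg rest _hs)
  · simp

theorem pvG_of_none (xs : List String) (h : pvSplitClose xs = none) : pvG xs = xs := by
  fun_induction pvG xs with
  | case1 => rfl
  | case2 us hs => rfl
  | case3 us seg rest hs ih => simp [pvSplitClose, hs] at h
  | case4 u us hu ih =>
    by_cases hb : u = "]"
    · simp [pvSplitClose, hb] at h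
    · rw [pvSplitClose, if_neg hb, Option.map_eq_none_iff] at h
      rw [ih h]

theorem pvSplitClose_drop (l : List String) (i : Nat) :
    pvSplitClose (l.drop i) =
      (pvFindClose l i).map (fun j => ((l.take j).drop i, l.drop (j + 1))) := by
  fun_induction pvFindClose l i with
  | case1 i hlen heq =>
    rw [List.drop_eq_getElem_cons hlen]
    have hgd : l[i] = "]" := by rwa [l.getD_eq_getElem "" hlen] at heq
    simp [pvSplitClose, hgd, List.drop_take]
  | case2 i hlen heq ih =>
    rw [List.drop_eq_getElem_cons hlen]
    have hgd : l[i] ≠ "]" := by rwa [l.getD_eq_getElem "" hlen] at heq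
    rw [pvSplitClose, if_neg hgd, ih]
    cases hf : pvFindClose l (i + 1) with
    | none => simp
    | some j =>
      have hj := pvFindClose_some l (i + 1) j hf
      simp only [Option.map_some]
      congr 1
      have : (l.take j).drop i = l[i] :: (l.take j).drop (i + 1) := by
        rw [List.drop_eq_getElem_cons (by simp; omega)]
        congr 1
        rw [List.getElem_take]
      rw [this]
  | case3 i hlen =>
    rw [List.drop_eq_nil_of_le (by omega)]
    simp [pvSplitClose]

theorem pvAltGo_eq_pvG (l : List String) (i : Nat) : pvAltGo l i = pvG (l.drop i) := by
  fun_induction pvAltGo l i with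
  | case1 i hi ht hf =>
    have hgd : l[i] = "[" := by rwa [l.getD_eq_getElem "" hi] at ht
    have hnone : pvSplitClose (l.drop (i + 1)) = none := by
      rw [pvSplitClose_drop, hf]; rfl
    have hnone0 : pvSplitClose (l.drop i) = none := by
      rw [List.drop_eq_getElem_cons hi, pvSplitClose, if_neg (by simp [hgd]), hnone]; rfl
    exact (pvG_of_none _ hnone0).symm
  | case2 i hi ht j hf ih =>
    have hgd : l[i] = "[" := by rwa [l.getD_eq_getElem "" hi] at ht
    obtain ⟨hj1, hj2, hj3⟩ := pvFindClose_some l (i + 1) j hf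
    have hgj : l[j] = "]" := by rwa [l.getD_eq_getElem "" hj2] at hj3
    have hsome : pvSplitClose (l.drop (i + 1)) =
        some ((l.take j).drop (i + 1), l.drop (j + 1)) := by
      rw [pvSplitClose_drop, hf]; rfl
    conv_rhs => rw [List.drop_eq_getElem_cons hi]
    rw [pvG, if_pos hgd, hsome, ih]
    congr 2
    rw [List.take_add_one, List.getElem?_eq_getElem hj2]
    simp only [Option.toList_some]
    rw [List.drop_append_of_le_length (by simp; omega)]
    rw [List.drop_eq_getElem_cons (show i < (l.take j).length by simp; omega)]
    rw [List.getElem_take]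
    simp [hgj]
  | case3 i hi ht ih =>
    have hgd : l[i] ≠ "[" := fun he => ht (by rw [l.getD_eq_getElem "" hi, he])
    conv_rhs => rw [List.drop_eq_getElem_cons hi]
    rw [pvG, if_neg hgd, l.getD_eq_getElem "" hi, ih]
  | case4 i hi =>
    rw [List.drop_eq_nil_of_le (by omega)]
    simp [pvG]

theorem pvInnerA_eq (l : List String) (i j : Nat) :
    pvInnerA l i j =
      match pvFindClose l j with
      | none => l
      | some k => l.take i ++ [PySem.Str.join "" ((l.take (k + 1)).drop i)] ++ l.drop (k + 1) := by
  fun_induction pvInnerA l i j with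
  | case1 j hlen heq => rw [pvFindClose, dif_pos hlen, if_pos heq]
  | case2 j hlen heq ih => rw [pvFindClose, dif_pos hlen, if_neg heq]; exact ih
  | case3 j hlen => rw [pvFindClose, dif_neg hlen]

theorem pvLoopA_eq (n : Nat) : ∀ i l, l.length ≤ n → pvLoopA n i l = l.take i ++ pvG (l.drop i) := by
  intro i l hlen
  fun_induction pvLoopA n i l with
  | case1 i l hin hend =>
    rw [List.take_of_length_le (by omega), List.drop_eq_nil_of_le (by omega)]
    simp [pvG]
  | case2 i l hin hend hb ih =>
    have hi : i < l.length := by omega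
    have hgd : l[i] = "[" := by rwa [l.getD_eq_getElem "" hi] at hb
    cases hf : pvFindClose l (i + 1) with
    | none =>
      have hinner : pvInnerA l i (i + 1) = l := by rw [pvInnerA_eq, hf]
      rw [hinner] at ih ⊢
      rw [ih (by omega)]
      have hnone : pvSplitClose (l.drop (i + 1)) = none := by
        rw [pvSplitClose_drop, hf]; rfl
      have hnone0 : pvSplitClose (l.drop i) = none := by
        rw [List.drop_eq_getElem_cons hi, pvSplitClose, if_neg (by simp [hgd]), hnone]; rfl
      rw [pvG_of_none _ hnone, pvG_of_none _ hnone0]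
      simp [List.take_append_drop]
    | some k =>
      obtain ⟨hk1, hk2, hk3⟩ := pvFindClose_some l (i + 1) k hf
      have hgk : l[k] = "]" := by rwa [l.getD_eq_getElem "" hk2] at hk3
      have hinner : pvInnerA l i (i + 1) =
          l.take i ++ [PySem.Str.join "" ((l.take (k + 1)).drop i)] ++ l.drop (k + 1) := by
        rw [pvInnerA_eq, hf]
      rw [hinner] at ih ⊢
      have hti : (l.take i).length = i := by simp; omega
      have hlen' : (l.take i ++ [PySem.Str.join "" ((l.take (k + 1)).drop i)] ++ l.drop (k + 1)).length ≤ n := by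
        simp; omega
      rw [ih hlen']
      have hlen1 : (l.take i ++ [PySem.Str.join "" ((l.take (k + 1)).drop i)]).length = i + 1 := by
        simp; omega
      have h1 : (l.take i ++ [PySem.Str.join "" ((l.take (k + 1)).drop i)] ++ l.drop (k + 1)).take (i + 1) =
          l.take i ++ [PySem.Str.join "" ((l.take (k + 1)).drop i)] := by
        rw [List.take_append, hlen1, Nat.sub_self, List.take_zero, List.append_nil,
            List.take_of_length_le (by rw [hlen1])]
      have h2 : (l.take i ++ [PySem.Str.join "" ((l.take (k + 1)).drop i)] ++ l.drop (k + 1)).drop (i + 1) =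
          l.drop (k + 1) := by
        rw [List.drop_append, hlen1, Nat.sub_self, List.drop_zero,
            List.drop_eq_nil_of_le (by rw [hlen1]), List.nil_append]
      rw [h1, h2]
      have hsome : pvSplitClose (l.drop (i + 1)) =
          some ((l.take k).drop (i + 1), l.drop (k + 1)) := by
        rw [pvSplitClose_drop, hf]; rfl
      conv_rhs => rw [List.drop_eq_getElem_cons hi]
      rw [pvG, if_pos hgd, hsome]
      have harg : (l.take (k + 1)).drop i = l[i] :: ((l.take k).drop (i + 1) ++ ["]"]) := by
        rw [List.take_add_one, List.getElem?_eq_getElem hk2]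
        simp only [Option.toList_some]
        rw [List.drop_append_of_le_length (by simp; omega)]
        rw [List.drop_eq_getElem_cons (show i < (l.take k).length by simp; omega)]
        rw [List.getElem_take]
        simp [hgk]
      rw [harg, hgd]
      simp
  | case3 i l hin hend hb ih =>
    have hi : i < l.length := by omega
    have hgd : l[i] ≠ "[" := fun he => hb (by rw [l.getD_eq_getElem "" hi, he])
    rw [ih (by omega)]
    conv_rhs => rw [List.drop_eq_getElem_cons hi]
    rw [pvG, if_neg hgd]
    have ht1 : l.take (i + 1) = l.take i ++ [l[i]] := by
      rw [List.take_add_one, List.getElem?_eq_getElem hi, Option.toList_some]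
    rw [ht1, List.append_assoc, List.singleton_append]
  | case4 i l hin =>
    rw [List.take_of_length_le (by omega), List.drop_eq_nil_of_le (by omega)]
    simp [pvG]

-- ===== VERDICT (by name: the statement is the Claim_ definition above) =====
theorem processToken_spec : Claim_equal_processToken := by
  intro l _
  unfold Spec_processToken processToken processToken_alt
  rw [pvLoopA_eq l.length 0 l le_rfl, pvAltGo_eq_pvG]
  rw [List.take_zero, List.drop_zero, List.nil_append]
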